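-- pv_equiv track=rewrite | github.com/tykkipeli/Pentagopark | bitboard.py | kaannaVasemmalle
-- ===== SOURCE A (Python) =====
-- def laske_mask(x,y):
--     return 1 << ((x - 1) * 7 + y - 1)
--
-- def kaannaVasemmalle(x, y, board):
--     kopio = board
--     for i in range(-1,2):
--         for j in range(-1,2):
--             bitti = (laske_mask(i+x, j+y) & board)
--             if bitti != 0:
--                 kopio |= laske_mask(-j+x, i+y)
--             else:
--                 kopio &= (~laske_mask(-j+x, i+y))
--     return kopio
-- ===== SOURCE B (Python) =====
-- def laske_mask(x, y):
--     return 1 << ((x - 1) * 7 + y - 1)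
--
-- def kaannaVasemmalle(x, y, board):
--     # Phase 1: clear the whole 3x3 neighborhood at once.
--     mask = 0
--     for i in range(-1, 2):
--         for j in range(-1, 2):
--             mask |= laske_mask(i + x, j + y)
--     kopio = board & ~mask
--     # Phase 2: set each rotated destination bit whose source bit is set.
--     for i in range(-1, 2):
--         for j in range(-1, 2):
--             if laske_mask(i + x, j + y) & board:
--                 kopio |= laske_mask(-j + x, i + y)
--     return kopio
-- ===== Notes on version B (the rewrite author's own statement) =====
-- stated objective: simpler
-- what changed: A interleaves set-or-clear decisions for each destination bit in one pass; B first clears the whole 3x3 neighborhood with one precomputed mask and then only ORs in the destination bits whose source bit is set, dropping the else branch.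
import Mathlib
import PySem

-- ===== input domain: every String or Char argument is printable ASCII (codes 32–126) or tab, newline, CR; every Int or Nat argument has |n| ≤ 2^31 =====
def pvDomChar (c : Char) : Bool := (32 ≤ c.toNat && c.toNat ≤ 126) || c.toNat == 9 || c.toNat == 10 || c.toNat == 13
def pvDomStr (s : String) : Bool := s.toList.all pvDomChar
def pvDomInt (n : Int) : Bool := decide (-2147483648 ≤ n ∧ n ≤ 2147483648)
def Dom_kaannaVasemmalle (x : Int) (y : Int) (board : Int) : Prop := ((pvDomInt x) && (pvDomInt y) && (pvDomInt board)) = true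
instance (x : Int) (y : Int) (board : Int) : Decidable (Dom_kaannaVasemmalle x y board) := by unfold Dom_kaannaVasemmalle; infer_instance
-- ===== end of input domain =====

-- B replaces A's interleaved set-or-clear pass by a two-phase decomposition: clear the whole
-- 3x3 neighborhood with one precomputed mask, then OR in only the destination bits whose source is set.


-- ===== PORT A =====
-- laske_mask; Python's `1 << n` raises ValueError for n < 0, which Pre_ excludes, so `.toNat` is
-- only reached with a nonnegative shift.
def laskeMask (x : Int) (y : Int) : Int := 1 <<< ((x - 1) * 7 + y - 1).toNat

def kaannaVasemmalle (x : Int) (y : Int) (board : Int) : Int :=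
  (PySem.List.pyRange (-1) 2 1).foldl (fun kopio i =>
    (PySem.List.pyRange (-1) 2 1).foldl (fun kopio j =>
      let bitti := PySem.Int.band (laskeMask (i + x) (j + y)) board
      if bitti ≠ 0 then
        PySem.Int.bor kopio (laskeMask (-j + x) (i + y))
      else
        PySem.Int.band kopio (Int.not (laskeMask (-j + x) (i + y)))) kopio) board

-- ===== PORT B =====
def kaannaVasemmalle_alt (x : Int) (y : Int) (board : Int) : Int :=
  let mask :=
    (PySem.List.pyRange (-1) 2 1).foldl (fun m i =>
      (PySem.List.pyRange (-1) 2 1).foldl (fun m j =>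
        PySem.Int.bor m (laskeMask (i + x) (j + y))) m) 0
  let kopio := PySem.Int.band board (Int.not mask)
  (PySem.List.pyRange (-1) 2 1).foldl (fun k i =>
    (PySem.List.pyRange (-1) 2 1).foldl (fun k j =>
      if PySem.Int.band (laskeMask (i + x) (j + y)) board ≠ 0 then
        PySem.Int.bor k (laskeMask (-j + x) (i + y))
      else k) k) kopio

-- ===== PRECONDITION & SPEC =====
-- Exactly the inputs where the smallest of the eighteen shift amounts (x-1+i)*7 + (y-1+j),
-- i,j ∈ {-1,0,1}, is nonnegative, i.e. where Python's `1 << shift` never raises ValueError.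
def Pre_kaannaVasemmalle (x : Int) (y : Int) (board : Int) : Prop :=
  0 ≤ (x - 2) * 7 + (y - 2)
instance (x : Int) (y : Int) (board : Int) : Decidable (Pre_kaannaVasemmalle x y board) := by
  unfold Pre_kaannaVasemmalle; infer_instance

def pvWitness_kaannaVasemmalle : Int × Int × Int := (3, 3, 12345)

def Spec_kaannaVasemmalle (x : Int) (y : Int) (board : Int) (out : Int) : Prop := out = kaannaVasemmalle_alt x y board
instance (x : Int) (y : Int) (board : Int) (out : Int) : Decidable (Spec_kaannaVasemmalle x y board out) := by unfold Spec_kaannaVasemmalle; infer_instance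

-- ===== CLAIM (what is proved, stated in full; the proofs are below) =====
def Claim_equal_kaannaVasemmalle : Prop := ∀ (x : Int) (y : Int) (board : Int), Dom_kaannaVasemmalle x y board → Pre_kaannaVasemmalle x y board → Spec_kaannaVasemmalle x y board (kaannaVasemmalle x y board)

-- ===== LEMMAS AND PROOFS =====

-- Extensionality of Int by testBit.
theorem pv_int_ext {a b : Int} (h : ∀ n, a.testBit n = b.testBit n) : a = b := by
  have big : ∀ (m k : Nat), m < 2 ^ (m + k) := fun m k =>
    lt_of_lt_of_le Nat.lt_two_pow_self (Nat.pow_le_pow_right (by norm_num) (Nat.le_add_right _ _))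
  rcases a with m | m <;> rcases b with n | n
  · exact congrArg _ (Nat.eq_of_testBit_eq fun i => h i)
  · have := h (m + n)
    simp [Int.testBit, Nat.testBit_lt_two_pow (big m n),
      Nat.testBit_lt_two_pow (show n < 2 ^ (m + n) by rw [Nat.add_comm]; exact big n m)] at this
  · have := h (m + n)
    simp [Int.testBit, Nat.testBit_lt_two_pow (show m < 2 ^ (m + n) from big m n),
      Nat.testBit_lt_two_pow (show n < 2 ^ (m + n) by rw [Nat.add_comm]; exact big n m)] at this
  · have : m = n := Nat.eq_of_testBit_eq fun i => by
      have := h i; simpa [Int.testBit] using this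
    simp [this]

-- Bridge: PySem's Python-exact bit operations are Lean's land/lor/lnot.
theorem pv_sub_and (m n : Nat) : m - (m &&& n) = m.ldiff n := by
  induction m using Nat.binaryRec generalizing n with
  | zero => apply Nat.eq_of_testBit_eq; simp [Nat.testBit_ldiff]
  | bit b m ih =>
    rw [← Nat.bit_testBit_zero_shiftRight_one n, Nat.ldiff_bit, Nat.land_bit,
      Nat.bit_val, Nat.bit_val, Nat.bit_val, ← ih (n >>> 1)]
    have h1 : m &&& (n >>> 1) ≤ m := Nat.and_le_left
    cases b <;> cases hn : n.testBit 0 <;> simp <;> omega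

theorem pv_band_eq_land (a b : Int) : PySem.Int.band a b = Int.land a b := by
  rcases a with m | m <;> rcases b with n | n <;>
    simp [PySem.Int.band, Int.land, Int.negSucc_eq, pv_sub_and] <;> omega

theorem pv_bor_eq_lor (a b : Int) : PySem.Int.bor a b = Int.lor a b := by
  rcases a with m | m <;> rcases b with n | n <;>
    simp [PySem.Int.bor, Int.lor, Int.negSucc_eq, pv_sub_and] <;> omega

theorem pv_tb_band (a b : Int) (n : Nat) :
    (PySem.Int.band a b).testBit n = (a.testBit n && b.testBit n) := by
  rw [pv_band_eq_land, Int.testBit_land]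

theorem pv_tb_bor (a b : Int) (n : Nat) :
    (PySem.Int.bor a b).testBit n = (a.testBit n || b.testBit n) := by
  rw [pv_bor_eq_lor, Int.testBit_lor]

theorem pv_tb_not (a : Int) (n : Nat) : (Int.not a).testBit n = !a.testBit n := by
  show (Int.lnot a).testBit n = _
  exact Int.testBit_lnot a n

-- msk t is 2^t.toNat, a single bit.
def msk (t : Int) : Int := 1 <<< t.toNat

theorem pv_tb_msk (t : Int) (n : Nat) : (msk t).testBit n = decide (t.toNat = n) := by
  show (Int.ofNat (1 <<< t.toNat)).testBit n = _
  show Nat.testBit (1 <<< t.toNat) n = _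
  simp [Nat.shiftLeft_eq, Nat.testBit_two_pow]

-- OR of the single-bit masks of a list of shift amounts.
def orMs : List Int → Int
  | [] => 0
  | d :: ds => Int.lor (msk d) (orMs ds)

theorem pv_tb_orMs (ds : List Int) (n : Nat) :
    (orMs ds).testBit n = ds.any (fun d => decide (d.toNat = n)) := by
  induction ds with
  | nil => simp [orMs, Int.testBit]
  | cons d ds ih => simp [orMs, Int.testBit_lor, pv_tb_msk, ih]

theorem pv_tb_zero (n : Nat) : (0 : Int).testBit n = false := by
  simp [Int.testBit]

-- OR of the destination bits whose source bit is set on `board`.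
def setM (board : Int) : List (Int × Int) → Int
  | [] => 0
  | (s, d) :: L =>
    Int.lor (if PySem.Int.band (msk s) board ≠ 0 then msk d else 0) (setM board L)

theorem pv_tb_setM (board : Int) (L : List (Int × Int)) (n : Nat) :
    (setM board L).testBit n =
      L.any (fun p => decide (PySem.Int.band (msk p.1) board ≠ 0) && decide (p.2.toNat = n)) := by
  induction L with
  | nil => simp [setM, pv_tb_zero]
  | cons p L ih =>
    obtain ⟨s, d⟩ := p
    by_cases h : PySem.Int.band (msk s) board ≠ 0 <;>
      simp [setM, Int.testBit_lor, pv_tb_msk, pv_tb_zero, ih, h]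

-- A's interleaved pass over a list of (source shift, destination shift) pairs, in closed form:
-- it clears every destination bit and sets those whose source bit is set, provided the
-- destination bit positions are pairwise distinct.
theorem pv_foldA (board : Int) (L : List (Int × Int)) (c0 : Int)
    (hd : (L.map (fun p => p.2.toNat)).Nodup) :
    L.foldl (fun c p =>
        let bitti := PySem.Int.band (msk p.1) board
        if bitti ≠ 0 then PySem.Int.bor c (msk p.2)
        else PySem.Int.band c (Int.not (msk p.2))) c0
      = Int.lor (Int.land c0 (Int.lnot (orMs (L.map Prod.snd)))) (setM board L) := by
  induction L generalizing c0 with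
  | nil =>
    apply pv_int_ext; intro n
    simp [orMs, setM, Int.testBit_lor, Int.testBit_land, Int.testBit_lnot, pv_tb_zero]
  | cons p L ih =>
    obtain ⟨s, d⟩ := p
    rw [List.map_cons, List.nodup_cons] at hd
    obtain ⟨hfresh, htail⟩ := hd
    rw [List.foldl_cons, ih _ htail]
    apply pv_int_ext; intro n
    have horMs : n = d.toNat → (orMs (L.map Prod.snd)).testBit n = false := by
      intro hn; subst hn
      rw [pv_tb_orMs]
      simp only [List.any_eq_false, List.mem_map]
      rintro t ⟨p, hp, rfl⟩
      simp only [List.mem_map] at hfresh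
      simp only [decide_eq_true_eq]
      intro hEq
      exact hfresh ⟨p, hp, hEq⟩
    have hsetM : n = d.toNat → (setM board L).testBit n = false := by
      intro hn; subst hn
      rw [pv_tb_setM]
      simp only [List.any_eq_false]
      intro p hp
      simp only [List.mem_map] at hfresh
      simp only [Bool.and_eq_true, decide_eq_true_eq, not_and]
      intro _ hEq
      exact hfresh ⟨p, hp, hEq⟩
    by_cases hq : PySem.Int.band (msk s) board ≠ 0 <;> by_cases hn : n = d.toNat
    · subst hn
      simp [setM, orMs, Int.testBit_lor, Int.testBit_land, Int.testBit_lnot,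
        pv_tb_bor, pv_tb_msk, hq, horMs rfl, hsetM rfl]
    · have hdn : d.toNat ≠ n := fun h => hn h.symm
      simp [setM, orMs, Int.testBit_lor, Int.testBit_land, Int.testBit_lnot,
        pv_tb_bor, pv_tb_msk, hq, hdn]
    · subst hn
      simp [setM, orMs, Int.testBit_lor, Int.testBit_land, Int.testBit_lnot,
        pv_tb_band, pv_tb_not, pv_tb_msk, pv_tb_zero, hq, horMs rfl, hsetM rfl]
    · have hdn : d.toNat ≠ n := fun h => hn h.symm
      simp [setM, orMs, Int.testBit_lor, Int.testBit_land, Int.testBit_lnot,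
        pv_tb_band, pv_tb_not, pv_tb_msk, pv_tb_zero, hq, hdn]

-- B's first phase: folding OR over single-bit masks.
theorem pv_foldB1 (L : List Int) (m0 : Int) :
    L.foldl (fun m t => PySem.Int.bor m (msk t)) m0 = Int.lor m0 (orMs L) := by
  induction L generalizing m0 with
  | nil => apply pv_int_ext; intro n; simp [orMs, Int.testBit_lor, pv_tb_zero]
  | cons t L ih =>
    rw [List.foldl_cons, ih]
    apply pv_int_ext; intro n
    simp [orMs, Int.testBit_lor, pv_tb_bor, Bool.or_assoc]

-- B's second phase: conditional ORs accumulate exactly setM.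
theorem pv_foldB2 (board : Int) (L : List (Int × Int)) (k0 : Int) :
    L.foldl (fun k p =>
        if PySem.Int.band (msk p.1) board ≠ 0 then PySem.Int.bor k (msk p.2) else k) k0
      = Int.lor k0 (setM board L) := by
  induction L generalizing k0 with
  | nil => apply pv_int_ext; intro n; simp [setM, Int.testBit_lor, pv_tb_zero]
  | cons p L ih =>
    obtain ⟨t, d⟩ := p
    rw [List.foldl_cons, ih]
    apply pv_int_ext; intro n
    by_cases hq : PySem.Int.band (msk t) board ≠ 0 <;>
      simp [setM, hq, Int.testBit_lor, pv_tb_bor, pv_tb_zero, Bool.or_assoc]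

-- The nine (source shift, destination shift) pairs of the 3x3 pass, in loop order.
def pvL (x y : Int) : List (Int × Int) :=
  [(-1 : Int), 0, 1].flatMap (fun i => [(-1 : Int), 0, 1].map (fun j =>
    ((i + x - 1) * 7 + (j + y) - 1, (-j + x - 1) * 7 + (i + y) - 1)))

-- ===== VERDICT (by name: the statement is the Claim_ definition above) =====
set_option maxHeartbeats 4000000 in
theorem kaannaVasemmalle_spec : Claim_equal_kaannaVasemmalle := by
  intro x y board _ hpre
  unfold Spec_kaannaVasemmalle
  unfold Pre_kaannaVasemmalle at hpre
  have hrange : PySem.List.pyRange (-1) 2 1 = [-1, 0, 1] := by decide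
  have hA : kaannaVasemmalle x y board =
      (pvL x y).foldl (fun c p =>
        let bitti := PySem.Int.band (msk p.1) board
        if bitti ≠ 0 then PySem.Int.bor c (msk p.2)
        else PySem.Int.band c (Int.not (msk p.2))) board := by
    simp only [kaannaVasemmalle, hrange, pvL, List.foldl_flatMap, List.foldl_map, laskeMask, msk]
  have hB : kaannaVasemmalle_alt x y board =
      (pvL x y).foldl (fun k p =>
        if PySem.Int.band (msk p.1) board ≠ 0 then PySem.Int.bor k (msk p.2) else k)
        (PySem.Int.band board
          (Int.not ((((pvL x y).map Prod.fst).foldl (fun m t => PySem.Int.bor m (msk t)) 0)))) := by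
    simp only [kaannaVasemmalle_alt, hrange, pvL, List.map_flatMap, List.map_map,
      Function.comp_def, List.foldl_flatMap, List.foldl_map, laskeMask, msk]
  have hnodup : ((pvL x y).map (fun p => p.2.toNat)).Nodup := by
    simp only [pvL, List.flatMap_cons,
      List.map_cons, List.map_nil, List.flatMap_nil, List.append_nil, List.cons_append,
      List.nil_append]
    simp only [List.nodup_cons, List.mem_cons, List.not_mem_nil, List.nodup_nil]
    norm_num
    omega
  rw [hA, hB, pv_foldA board _ board hnodup, pv_foldB2, pv_foldB1]
  have hmask : orMs ((pvL x y).map Prod.snd) = Int.lor 0 (orMs ((pvL x y).map Prod.fst)) := by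
    apply pv_int_ext; intro n
    simp only [pvL, List.flatMap_cons,
      List.map_cons, List.map_nil, List.flatMap_nil, List.append_nil, List.cons_append,
      List.nil_append, Int.testBit_lor, pv_tb_zero, Bool.false_or, pv_tb_orMs,
      List.any_cons, List.any_nil, Bool.or_false]
    rw [Bool.eq_iff_iff]
    simp only [Bool.or_eq_true, decide_eq_true_eq]
    ring_nf
    tauto
  simp only [pv_band_eq_land, show Int.not = Int.lnot from rfl, hmask]
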